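-- pv_equiv track=rewrite | github.com/Alvinkariuki/mini-problems-solved | python Code challenges/pairfinder.py | pairFinder
-- ===== SOURCE A (Python) =====
-- def pairFinder(n, list_of_pairs):
--     list_of_pairs.sort()
--     num_dicti = {}
--     skip = False
--     for i in range(n-1):
--         if skip:
--             skip = False
--             continue
--         elif list_of_pairs[i] ==  list_of_pairs[i+1]:
--             num_dicti[i]= 1
--             skip = True
--             continue
--         else:
--             num_dicti[i]= 0
--
--     return sum(value == 1 for value in num_dicti.values())
-- ===== SOURCE B (Python) =====
-- def pairFinder(n, list_of_pairs):
--     # Count pairs among the n smallest values: histogram of the sorted prefix,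
--     # each value contributes count // 2 pairs. (Does not mutate the argument,
--     # unlike A, which sorts it in place; the return value is the same.)
--     prefix = sorted(list_of_pairs)[:max(n, 0)]
--     counts = {}
--     for v in prefix:
--         counts[v] = counts.get(v, 0) + 1
--     return sum(c // 2 for c in counts.values())
-- ===== Notes on version B (the rewrite author's own statement) =====
-- stated objective: simpler
-- what changed: Replaces the index loop with a skip flag and a position-keyed 0/1 dict (greedy adjacent matching over sorted indices) by a value histogram of the sorted n-prefix, returning the sum of count//2 per value; no per-index dict, no skip state.
import Mathlib
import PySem

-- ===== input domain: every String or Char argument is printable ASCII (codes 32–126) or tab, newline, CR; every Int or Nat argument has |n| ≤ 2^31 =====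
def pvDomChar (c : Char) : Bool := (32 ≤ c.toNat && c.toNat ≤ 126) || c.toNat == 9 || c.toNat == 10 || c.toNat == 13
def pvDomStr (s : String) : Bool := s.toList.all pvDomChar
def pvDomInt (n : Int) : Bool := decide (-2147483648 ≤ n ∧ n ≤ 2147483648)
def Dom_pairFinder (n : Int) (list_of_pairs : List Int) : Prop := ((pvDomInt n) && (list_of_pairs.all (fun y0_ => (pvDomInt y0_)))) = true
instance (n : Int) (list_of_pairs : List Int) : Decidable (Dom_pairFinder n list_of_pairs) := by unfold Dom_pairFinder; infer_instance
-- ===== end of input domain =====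

-- B replaces A's index loop + skip flag + position-keyed 0/1 dict by a value histogram of the
-- sorted n-prefix (sum of count // 2); equivalence is about the RETURN value only — A sorts its
-- list argument in place, B does not mutate it.

-- ===== PORT A =====
def pairFinder (n : Int) (list_of_pairs : List Int) : Int :=
  let lop := PySem.List.sorted list_of_pairs (fun x => x) false
  let res := (PySem.List.pyRange 0 (n - 1) 1).foldl
    (fun (st : PySem.Dict Int Int × Bool) i =>
      if st.2 then (st.1, false)
      else if PySem.List.pyGetD lop i 0 = PySem.List.pyGetD lop (i + 1) 0 then
        (st.1.insert i 1, true)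
      else
        (st.1.insert i 0, false))
    (PySem.Dict.empty, false)
  (res.1.values.map (fun v => if v = 1 then (1 : Int) else 0)).sum

-- ===== PORT B =====
def pairFinder_alt (n : Int) (list_of_pairs : List Int) : Int :=
  let pfx := PySem.List.slice (PySem.List.sorted list_of_pairs (fun x => x) false) none (some (max n 0))
  let counts := pfx.foldl (fun (d : PySem.Dict Int Int) v => d.insert v (d.getD v 0 + 1)) PySem.Dict.empty
  (counts.values.map (fun c => PySem.Int.floordiv c 2)).sum

-- ===== PRECONDITION & SPEC =====
-- Pre_ is exactly where Python A returns: A raises IndexError when n ≥ len+2, and when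
-- n = len+1 unless its last loop index is skipped (multiplicity of the maximum even).
def Pre_pairFinder (n : Int) (list_of_pairs : List Int) : Prop :=
  n ≤ (list_of_pairs.length : Int) ∨
    (n = (list_of_pairs.length : Int) + 1 ∧
      list_of_pairs.max?.all (fun m => list_of_pairs.count m % 2 == 0) = true)
instance (n : Int) (list_of_pairs : List Int) : Decidable (Pre_pairFinder n list_of_pairs) := by
  unfold Pre_pairFinder; infer_instance
def pvWitness_pairFinder : Int × List Int := (4, [1, 2, 1, 2])

def Spec_pairFinder (n : Int) (list_of_pairs : List Int) (out : Int) : Prop := out = pairFinder_alt n list_of_pairs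
instance (n : Int) (list_of_pairs : List Int) (out : Int) : Decidable (Spec_pairFinder n list_of_pairs out) := by unfold Spec_pairFinder; infer_instance

-- ===== CLAIM (what is proved, stated in full; the proofs are below) =====
def Claim_equal_pairFinder : Prop := ∀ (n : Int) (list_of_pairs : List Int), Dom_pairFinder n list_of_pairs → Pre_pairFinder n list_of_pairs → Spec_pairFinder n list_of_pairs (pairFinder n list_of_pairs)

-- ===== LEMMAS AND PROOFS =====

/-- The 0/1 sum A takes over its dict values. -/
def sOnes (l : List Int) : Int := (l.map (fun v => if v = 1 then (1 : Int) else 0)).sum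

/-- Structural form of A's loop: `m` remaining iterations over the suffix `u`, skip flag `sk`;
returns the number of `1`-insertions. -/
def f2 : List Int → Nat → Bool → Nat
  | _, 0, _ => 0
  | u, m + 1, true => f2 (u.drop 1) m false
  | u, m + 1, false =>
      if u.getD 0 0 = u.getD 1 0 then f2 (u.drop 1) m true + 1
      else f2 (u.drop 1) m false

/-- Greedy adjacent pairing (what A's skip-flag scan computes on the sorted list). -/
def pairsG : List Int → Nat
  | [] => 0
  | [_] => 0
  | a :: b :: t => if a = b then pairsG t + 1 else pairsG (b :: t)

lemma values_insert_fresh (d : PySem.Dict Int Int) (k v : Int) (h : ∀ i ∈ d.keys, i < k) :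
    (d.insert k v).values = d.values ++ [v] := by
  have hc : d.contains k = false := by
    rw [Bool.eq_false_iff]
    intro hcc
    have := h k ((PySem.Dict.contains_iff_mem_keys d k).mp hcc)
    omega
  have hi := PySem.Dict.items_insert_of_not_contains (d := d) (k := k) (v := v) hc
  simp only [PySem.Dict.values, hi, List.map_append]
  simp

lemma sOnes_append (l : List Int) (v : Int) :
    sOnes (l ++ [v]) = sOnes l + (if v = 1 then 1 else 0) := by
  simp [sOnes]

lemma loopA (s : List Int) (m : Nat) :
    ∀ (k : Int) (d : PySem.Dict Int Int) (sk : Bool), 0 ≤ k → (∀ i ∈ d.keys, i < k) →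
    sOnes (((PySem.List.pyRange k (k + (m : Int)) 1).foldl
      (fun (st : PySem.Dict Int Int × Bool) i =>
        if st.2 then (st.1, false)
        else if PySem.List.pyGetD s i 0 = PySem.List.pyGetD s (i + 1) 0 then
          (st.1.insert i 1, true)
        else
          (st.1.insert i 0, false))
      (d, sk)).1.values)
      = sOnes d.values + (f2 (s.drop k.toNat) m sk : Int) := by
  induction m with
  | zero =>
    intro k d sk _ _
    rw [PySem.List.pyRange_one_eq_nil (by omega)]
    simp [f2]
  | succ m ih =>
    intro k d sk hk hkeys
    rw [PySem.List.pyRange_one_cons (by omega : k < k + ((m+1:Nat) : Int))]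
    have hstep : k + ((m+1:Nat) : Int) = (k + 1) + (m : Int) := by push_cast; ring
    rw [hstep]
    have hdrop : s.drop (k+1).toNat = (s.drop k.toNat).drop 1 := by
      rw [List.drop_drop]
      congr 1
      omega
    have hget0 : PySem.List.pyGetD s k 0 = (s.drop k.toNat).getD 0 0 := by
      rw [PySem.List.pyGetD_of_nonneg s 0 hk]
      simp [List.getD, List.getElem?_drop]
    have hget1 : PySem.List.pyGetD s (k + 1) 0 = (s.drop k.toNat).getD 1 0 := by
      rw [PySem.List.pyGetD_of_nonneg s 0 (by omega)]
      simp only [List.getD, List.getElem?_drop]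
      congr 2
      omega
    cases sk with
    | true =>
      simp only [List.foldl_cons, reduceIte]
      rw [ih (k + 1) d false (by omega) (fun i hi => by have := hkeys i hi; omega)]
      simp [f2, hdrop]
    | false =>
      simp only [List.foldl_cons]
      by_cases hcmp : PySem.List.pyGetD s k 0 = PySem.List.pyGetD s (k + 1) 0
      · simp only [if_pos hcmp, Bool.false_eq_true, if_false]
        rw [ih (k + 1) (d.insert k 1) true (by omega)
          (fun i hi => by rcases (PySem.Dict.mem_keys_insert d k i 1).mp hi with h | h
                          · omega
                          · have := hkeys i h; omega)]
        rw [values_insert_fresh d k 1 hkeys, sOnes_append]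
        have : f2 (s.drop k.toNat) (m+1) false = f2 ((s.drop k.toNat).drop 1) m true + 1 := by
          rw [f2]
          rw [if_pos (by rw [← hget0, ← hget1]; exact hcmp)]
        rw [this, ← hdrop]
        push_cast
        ring
      · simp only [if_neg hcmp, Bool.false_eq_true, if_false]
        rw [ih (k + 1) (d.insert k 0) false (by omega)
          (fun i hi => by rcases (PySem.Dict.mem_keys_insert d k i 0).mp hi with h | h
                          · omega
                          · have := hkeys i h; omega)]
        rw [values_insert_fresh d k 0 hkeys, sOnes_append]
        have : f2 (s.drop k.toNat) (m+1) false = f2 ((s.drop k.toNat).drop 1) m false := by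
          rw [f2]
          rw [if_neg (by rw [← hget0, ← hget1]; exact hcmp)]
        rw [this, ← hdrop]
        push_cast
        ring

lemma A_eq_f2 (n : Int) (lst : List Int) :
    pairFinder n lst = (f2 (PySem.List.sorted lst (fun x => x) false) (n - 1).toNat false : Int) := by
  have hr : PySem.List.pyRange 0 (n - 1) 1 = PySem.List.pyRange 0 (0 + (((n-1).toNat : Nat) : Int)) 1 := by
    rcases le_or_gt 0 (n - 1) with h | h
    · congr 1
      omega
    · rw [PySem.List.pyRange_one_eq_nil (by omega), PySem.List.pyRange_one_eq_nil (by omega)]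
  show sOnes _ = _
  have hemp : (PySem.Dict.empty : PySem.Dict Int Int).values = [] := rfl
  rw [hr, loopA (PySem.List.sorted lst (fun x => x) false) (n-1).toNat 0 PySem.Dict.empty false
    (by omega) (by simp [PySem.Dict.keys_empty])]
  simp [hemp, sOnes]

lemma f2_eq_pairsG_take (u : List Int) :
    ∀ m : Nat, u.Pairwise (· ≤ ·) → m < u.length → f2 u m false = pairsG (u.take (m + 1)) := by
  induction u using pairsG.induct with
  | case1 => intro m _ h; simp at h
  | case2 a => intro m _ h
               have : m = 0 := by simpa using Nat.lt_one_iff.mp (by simpa using h)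
               subst this
               simp [f2, pairsG]
  | case3 a t ih =>
    intro m hp hm
    match m with
    | 0 => simp [f2, pairsG]
    | 1 => simp [f2, pairsG, List.getD]
    | (m'' + 2) =>
      have h1 : f2 (a :: a :: t) (m'' + 2) false = f2 t m'' false + 1 := by
        rw [f2, if_pos (by simp [List.getD])]
        rfl
      rw [h1, ih m'' (hp.of_cons.of_cons) (by simp at hm; omega)]
      simp [pairsG]
  | case4 a b t hab ih =>
    intro m hp hm
    match m with
    | 0 => simp [f2, pairsG]
    | (m' + 1) =>
      have h1 : f2 (a :: b :: t) (m' + 1) false = f2 (b :: t) m' false := by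
        rw [f2, if_neg (by simp [List.getD]; exact hab)]
        simp
      rw [h1, ih m' hp.of_cons (by simp at hm ⊢; omega)]
      simp [pairsG, if_neg hab]

lemma f2_len_eq_pairsG (u : List Int) :
    u.Pairwise (· ≤ ·) → (∀ x ∈ u.getLast?, u.count x % 2 = 0) →
    f2 u u.length false = pairsG u := by
  induction u using pairsG.induct with
  | case1 => intro _ _; simp [f2, pairsG]
  | case2 a =>
    intro _ hcnt
    have := hcnt a (by simp)
    simp at this
  | case3 a t ih =>
    intro hp hcnt
    have h1 : f2 (a :: a :: t) (a :: a :: t).length false = f2 t t.length false + 1 := by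
      have : (a :: a :: t).length = t.length + 2 := by simp
      rw [this, f2, if_pos (by simp [List.getD])]
      rfl
    rw [h1, ih hp.of_cons.of_cons ?hc]
    · simp [pairsG]
    case hc =>
      intro x hx
      have ht : t ≠ [] := by rintro rfl; simp at hx
      have hlast : (a :: t).getLast? = some x := by
        have : (a :: t).getLast? = t.getLast? := by
          cases t with
          | nil => simp at ht
          | cons b s => exact List.getLast?_cons_cons ..
        rw [this]; exact hx
      have := hcnt x hlast
      have hcx : (a :: a :: t).count x = t.count x + (if a = x then 2 else 0) := by
        simp [List.count_cons]
        split_ifs <;> omega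
      rw [hcx] at this
      split_ifs at this <;> omega
  | case4 a b t hab ih =>
    intro hp hcnt
    have h1 : f2 (a :: b :: t) (a :: b :: t).length false = f2 (b :: t) (b :: t).length false := by
      have : (a :: b :: t).length = (b :: t).length + 1 := by simp
      rw [this, f2, if_neg (by simp [List.getD]; exact hab)]
      simp
    rw [h1, ih hp.of_cons ?hc]
    · simp [pairsG, if_neg hab]
    case hc =>
      intro x hx
      have hxm : x ∈ b :: t := List.mem_of_getLast? hx
      have hax : a ≠ x := by
        rintro rfl
        rcases hxm with _ | hxt
        · exact hab rfl
        · have h1 : a ≤ b := (List.pairwise_cons.mp hp).1 b (by simp)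
          have h2 : b ≤ a := (List.pairwise_cons.mp hp.of_cons).1 a (by assumption)
          exact hab (le_antisymm h1 h2)
      have hlast : (a :: b :: t).getLast? = some x := by
        rwa [List.getLast?_cons_cons]
      have := hcnt x hlast
      have hcx : (a :: b :: t).count x = (b :: t).count x := by
        simp [List.count_cons, if_neg hax]
      omega

lemma not_mem_of_head_lt (a b : Int) (t : List Int) (hab : a ≠ b)
    (hp : (a :: b :: t).Pairwise (· ≤ ·)) : a ∉ b :: t := by
  intro hmem
  rcases hmem with _ | hat
  · exact hab rfl
  · have h1 : a ≤ b := (List.pairwise_cons.mp hp).1 b (by simp)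
    have h2 : b ≤ a := (List.pairwise_cons.mp hp.of_cons).1 a (by assumption)
    exact hab (le_antisymm h1 h2)

lemma pairsG_eq_sum (u : List Int) (h : u.Pairwise (· ≤ ·)) :
    pairsG u = ∑ v ∈ u.toFinset, u.count v / 2 := by
  induction u using pairsG.induct with
  | case1 => simp [pairsG]
  | case2 a => simp [pairsG]
  | case3 a t ih =>
    have hS : (a :: a :: t).toFinset = insert a t.toFinset := by simp
    have hcnt : ∀ v, (a :: a :: t).count v = t.count v + (if v = a then 2 else 0) := by
      intro v
      simp [List.count_cons]
      split_ifs <;> omega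
    have hstep : ∀ v ∈ insert a t.toFinset,
        (a :: a :: t).count v / 2 = t.count v / 2 + (if v = a then 1 else 0) := by
      intro v _
      rw [hcnt]
      split_ifs <;> omega
    rw [pairsG, if_pos rfl, hS, Finset.sum_congr rfl hstep, Finset.sum_add_distrib,
      Finset.sum_ite_eq' (insert a t.toFinset) a (fun _ => 1), if_pos (Finset.mem_insert_self a _),
      ih h.of_cons.of_cons]
    by_cases hat : a ∈ t.toFinset
    · rw [Finset.insert_eq_self.mpr hat]
    · rw [Finset.sum_insert hat]
      have : t.count a = 0 := by
        simp [List.count_eq_zero]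
        intro hmem
        exact hat (List.mem_toFinset.mpr hmem)
      rw [this]
      simp
  | case4 a b t hab ih =>
    have hnm : a ∉ b :: t := not_mem_of_head_lt a b t hab h
    have hS : (a :: b :: t).toFinset = insert a (b :: t).toFinset := by simp
    have hnf : a ∉ (b :: t).toFinset := fun hc => hnm (List.mem_toFinset.mp hc)
    rw [pairsG, if_neg hab, hS, Finset.sum_insert hnf, ih h.of_cons]
    have ha : (a :: b :: t).count a = 1 := by
      rw [List.count_cons_self, List.count_eq_zero.mpr hnm]
    have hother : ∀ v ∈ (b :: t).toFinset, (a :: b :: t).count v / 2 = (b :: t).count v / 2 := by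
      intro v hv
      have : v ≠ a := fun hc => hnf (hc ▸ hv)
      rw [List.count_cons, if_neg (by simpa using this.symm)]
      simp
    rw [ha, Finset.sum_congr rfl hother]
    simp

lemma B_eq_sum (n : Int) (lst : List Int) :
    pairFinder_alt n lst
      = ((∑ v ∈ ((PySem.List.sorted lst (fun x => x) false).take n.toNat).toFinset,
          ((PySem.List.sorted lst (fun x => x) false).take n.toNat).count v / 2 : Nat) : Int) := by
  have key : pairFinder_alt n lst = (List.map (fun c => PySem.Int.floordiv c 2)
      ((List.foldl (fun (d : PySem.Dict Int Int) v => d.insert v (d.getD v 0 + 1)) PySem.Dict.empty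
        (PySem.List.slice (PySem.List.sorted lst (fun x => x) false) none (some (max n 0)))).values)).sum := rfl
  rw [key, PySem.List.slice_to _ (by omega : (0:Int) ≤ max n 0)]
  have hmax : (max n 0).toNat = n.toNat := by omega
  rw [hmax]
  set p := (PySem.List.sorted lst (fun x => x) false).take n.toNat with hp
  rw [PySem.Dict.foldl_insert_getD_add_one_eq_counter]
  have hv : (PySem.Dict.counter p).values = (PySem.Set.ofList p).map (fun k => ((p.count k : Nat) : Int)) := by
    simp only [PySem.Dict.values, PySem.Dict.items_counter, List.map_map]
    rfl
  rw [hv, List.map_map]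
  have hmapeq : ((PySem.Set.ofList p).map ((fun c => PySem.Int.floordiv c 2) ∘ (fun k => ((p.count k : Nat) : Int))))
      = (PySem.Set.ofList p).map (fun k => (((p.count k) / 2 : Nat) : Int)) := by
    apply List.map_congr_left
    intro v _
    show PySem.Int.floordiv ((p.count v : Nat) : Int) 2 = _
    have := PySem.Int.floordiv_natCast (p.count v) 2
    exact_mod_cast this
  rw [hmapeq]
  have hcast : ((PySem.Set.ofList p).map (fun k => (((p.count k) / 2 : Nat) : Int))).sum
      = (((PySem.Set.ofList p).map (fun k => (p.count k) / 2)).sum : Nat) := by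
    rw [Nat.cast_list_sum, List.map_map]
    rfl
  rw [hcast]
  congr 1
  have hnodup : (PySem.Set.ofList p).Nodup := PySem.Set.nodup_ofList p
  rw [← List.sum_toFinset _ hnodup]
  apply Finset.sum_congr
  · ext v
    simp [PySem.Set.mem_ofList]
  · intros; rfl

lemma le_getLast_of_sorted (x : Int) :
    ∀ (u : List Int), u.Pairwise (· ≤ ·) → u.getLast? = some x → ∀ y ∈ u, y ≤ x := by
  intro u
  induction u with
  | nil => simp
  | cons a t ih =>
    intro hp hl y hy
    cases t with
    | nil =>
      simp at hl hy
      omega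
    | cons b s =>
      rw [List.getLast?_cons_cons] at hl
      have hxm : x ∈ b :: s := List.mem_of_getLast? hl
      rcases List.mem_cons.mp hy with rfl | hyt
      · exact (List.pairwise_cons.mp hp).1 x hxm
      · exact ih hp.of_cons hl y hyt

lemma main_eq (n : Int) (lst : List Int) (hpre : Pre_pairFinder n lst) :
    pairFinder n lst = pairFinder_alt n lst := by
  rw [A_eq_f2, B_eq_sum]
  set u := PySem.List.sorted lst (fun x => x) false with hu
  have hlen : u.length = lst.length := PySem.List.length_sorted lst _ false
  have hsorted : u.Pairwise (· ≤ ·) := PySem.List.sorted_pairwise lst (fun x => x)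
  have hperm : u.Perm lst := PySem.List.sorted_perm lst (fun x => x) false
  congr 1
  rcases le_or_gt n 0 with hn0 | hn0
  · have h1 : (n - 1).toNat = 0 := by omega
    have h2 : n.toNat = 0 := by omega
    rw [h1, h2]
    simp [f2]
  · rcases le_or_gt n (lst.length : Int) with hnle | hngt
    · have hm : (n - 1).toNat < u.length := by omega
      rw [f2_eq_pairsG_take u (n - 1).toNat hsorted hm]
      have h3 : (n - 1).toNat + 1 = n.toNat := by omega
      rw [h3]
      exact pairsG_eq_sum _ (hsorted.sublist (List.take_sublist _ _))
    · rcases hpre with hle | ⟨hn, hall⟩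
      · omega
      · have hm : (n - 1).toNat = u.length := by omega
        have htake : u.take n.toNat = u := List.take_of_length_le (by omega)
        rw [hm, htake]
        have hcond : ∀ x ∈ u.getLast?, u.count x % 2 = 0 := by
          intro x hx
          have hxu : x ∈ u := List.mem_of_getLast? hx
          have hne : lst ≠ [] := by
            intro hnil
            subst hnil
            have hunil : u = [] := (PySem.List.sorted_eq_nil_iff _ _ _).mpr rfl
            rw [hunil] at hxu
            simp at hxu
          cases hmax : lst.max? with
          | none => exact absurd (List.max?_eq_none_iff.mp hmax) hne
          | some M =>
            have hM := List.max?_eq_some_iff.mp hmax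
            have hxM : x = M := by
              have h1 : x ≤ M := hM.2 x (hperm.mem_iff.mp hxu)
              have h2 : M ≤ x := le_getLast_of_sorted x u hsorted
                (Option.mem_def.mp hx) M (hperm.mem_iff.mpr hM.1)
              omega
            rw [hmax] at hall
            simp at hall
            rw [hxM, hperm.count_eq]
            exact hall
        rw [f2_len_eq_pairsG u hsorted hcond]
        exact pairsG_eq_sum u hsorted

-- ===== VERDICT (by name: the statement is the Claim_ definition above) =====
theorem pairFinder_spec : Claim_equal_pairFinder := by
  intro n lst _ hpre
  unfold Spec_pairFinder
  exact main_eq n lst hpre
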